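-- pv_equiv track=rewrite | github.com/KhandlaMayur/Hacker-Rank | Gaming Array.py | gamingArray
-- ===== SOURCE A (Python) =====
-- def gamingArray(arr):
--     # Write your code here
--
--     # players = ["BOB", "ANDY"]
--     # turn = 0  # 0-> BOB 1-> ANDY
--     # last_player = None
--
--     # while (arr):
--     #     player=players[turn]
--
--     #     last_player = player
--     #     maxi = max(arr)
--     #     x=arr.index(maxi)
--     #     arr=arr[:x]
--     #     turn = 1 - turn
--     # return last_player
--     biggest = -1
--     move_count = 0
--
--     for i in arr:
--         if(i>biggest):
--             biggest = i
--             move_count += 1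
--
--     # if (move_count % 2 == 0):
--     #     return "ANDY"
--     # else:
--     #     return "BOB"
--     if (move_count % 2 == 1):
--         return "BOB"
--     else:
--         return "ANDY"
-- ===== SOURCE B (Python) =====
-- def gamingArray(arr):
--     moves = 0
--     while arr:
--         arr = arr[:arr.index(max(arr))]
--         moves += 1
--     return "BOB" if moves % 2 == 1 else "ANDY"
-- ===== Notes on version B (the rewrite author's own statement) =====
-- stated objective: alternative
-- what changed: B simulates the game itself - repeatedly cut the array before its first maximum, counting moves - instead of A's single record-counting pass with a biggest=-1 sentinel.
-- intended difference: On arrays whose left-to-right strict maxima include an odd number of negative values (impossible in the HackerRank domain of positive tower heights), A's biggest=-1 sentinel skips those moves and returns the wrong winner (e.g. ANDY on [-5]), while B simulates the actual game and returns the intended winner (BOB on [-5]). — e.g. on gamingArray([-5]): A returns "ANDY", B returns "BOB"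
import Mathlib
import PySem

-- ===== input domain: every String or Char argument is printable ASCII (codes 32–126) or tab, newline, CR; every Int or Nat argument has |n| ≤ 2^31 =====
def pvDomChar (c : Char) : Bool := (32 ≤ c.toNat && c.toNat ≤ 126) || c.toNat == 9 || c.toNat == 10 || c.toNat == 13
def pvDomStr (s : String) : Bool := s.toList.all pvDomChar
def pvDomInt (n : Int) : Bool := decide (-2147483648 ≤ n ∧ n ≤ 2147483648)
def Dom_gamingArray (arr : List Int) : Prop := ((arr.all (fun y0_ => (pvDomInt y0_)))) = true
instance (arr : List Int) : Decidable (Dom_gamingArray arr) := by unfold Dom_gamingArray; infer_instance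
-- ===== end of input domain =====

-- B re-implements the winner computation as a direct simulation of the game (repeatedly cutting the
-- array before its first maximum and counting moves) instead of A's single record-counting pass;
-- same cost class is not claimed (B is quadratic in the worst case) — the objective is an
-- alternative algorithm. A's `biggest = -1` sentinel miscounts moves made on negative towers;
-- that corner is declared as the intended difference D_ below.

-- ===== PORT A =====
-- the loop `for i in arr: if i > biggest: biggest = i; move_count += 1` as a foldl over (biggest, move_count);
-- `move_count % 2` : move_count ≥ 0 and the modulus 2 is positive, where Lean's Int.emod agrees with Python's %.
def gamingArray (arr : List Int) : String :=
  if (arr.foldl (fun (s : Int × Int) i => if s.1 < i then (i, s.2 + 1) else s) (-1, 0)).2 % 2 == 1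
  then "BOB" else "ANDY"

-- ===== PORT B =====
-- the `while arr:` loop of Source B: max(arr) → PySem.List.max?, arr.index(m) → PySem.List.index?,
-- arr[:x] → PySem.List.slice; the `none` branches are unreachable (the list is nonempty and the
-- maximum is a member).
def simMoves (l : List Int) : Nat :=
  match l with
  | [] => 0
  | a :: t =>
    match _h1 : PySem.List.max? (a :: t) (fun y => y) with
    | none => 0
    | some m =>
      match h2 : PySem.List.index? (a :: t) m with
      | none => 0
      | some x => simMoves (PySem.List.slice (a :: t) none (some (x : Int))) + 1
termination_by l.length
decreasing_by
  obtain ⟨hx, -, -⟩ := PySem.List.getElem_of_index?_eq_some h2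
  simp only [PySem.List.slice_to_natCast, List.length_take, List.length_cons]
  simp only [List.length_cons] at hx
  omega

def gamingArray_alt (arr : List Int) : String :=
  if simMoves arr % 2 == 1 then "BOB" else "ANDY"

-- ===== PRECONDITION & SPEC =====
-- On arrays whose left-to-right strict maxima include an odd number of negative values (impossible
-- in the HackerRank domain of positive tower heights), A's `biggest = -1` sentinel skips those moves
-- and returns the wrong winner (e.g. "ANDY" on [-5]), while B simulates the actual game and returns
-- the intended winner ("BOB" on [-5]).
-- closed form on the input: the negative left-to-right strict maxima of arr are exactly the
-- left-to-right strict maxima of its longest all-negative prefix (any later record exceeds a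
-- nonnegative element); a position is a strict maximum iff its value bounds its prefix strictly.
def D_gamingArray (arr : List Int) : Prop :=
  (let neg := arr.takeWhile (fun v => decide (v < 0));
    (neg.inits.zip neg).countP (fun p => decide (∀ q ∈ p.1, q < p.2))) % 2 = 1
instance (arr : List Int) : Decidable (D_gamingArray arr) := by unfold D_gamingArray; infer_instance

def Spec_gamingArray (arr : List Int) (out : String) : Prop := ¬ D_gamingArray arr → out = gamingArray_alt arr
instance (arr : List Int) (out : String) : Decidable (Spec_gamingArray arr out) := by unfold Spec_gamingArray; infer_instance

def pvDiffWitness_gamingArray : List Int := [-5]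
def pvDiffWitnessOut_gamingArray : String × String := ("ANDY", "BOB")

-- ===== CLAIM (what is proved, stated in full; the proofs are below) =====
def Claim_unchanged_gamingArray : Prop := ∀ (arr : List Int), Dom_gamingArray arr → Spec_gamingArray arr (gamingArray arr)
def Claim_changed_gamingArray : Prop := Dom_gamingArray (pvDiffWitness_gamingArray) ∧ D_gamingArray (pvDiffWitness_gamingArray) ∧ gamingArray (pvDiffWitness_gamingArray) = pvDiffWitnessOut_gamingArray.1 ∧ gamingArray_alt (pvDiffWitness_gamingArray) = pvDiffWitnessOut_gamingArray.2 ∧ pvDiffWitnessOut_gamingArray.1 ≠ pvDiffWitnessOut_gamingArray.2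
def Claim_exact_gamingArray : Prop := ∀ (arr : List Int), Dom_gamingArray arr → D_gamingArray arr → gamingArray arr ≠ gamingArray_alt arr

-- ===== LEMMAS AND PROOFS =====

-- recursive counters for the proofs: pvNegRecs b t / pvNegCount count the negative left-to-right
-- strict maxima given the running maximum so far.
def pvNegRecs : Int → List Int → Nat
  | _, [] => 0
  | b, a :: t => if b < a then (if a < 0 then pvNegRecs a t + 1 else 0) else pvNegRecs b t

def pvNegCount : List Int → Nat
  | [] => 0
  | a :: t => if a < 0 then pvNegRecs a t + 1 else 0

-- number of left-to-right strict maxima of l exceeding the running maximum b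
def recAux : Int → List Int → Nat
  | _, [] => 0
  | b, a :: t => if b < a then recAux a t + 1 else recAux b t

-- number of left-to-right strict maxima of l (from -∞: the head always counts)
def rcount : List Int → Nat
  | [] => 0
  | a :: t => recAux a t + 1

-- A's fold computes recAux
theorem foldA_eq (l : List Int) : ∀ (b c : Int),
    (l.foldl (fun (s : Int × Int) i => if s.1 < i then (i, s.2 + 1) else s) (b, c)).2
      = c + (recAux b l : Int) := by
  induction l with
  | nil => intro b c; simp [recAux]
  | cons a t ih =>
    intro b c
    by_cases h : b < a
    · simp [List.foldl, h, recAux, ih]; ring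
    · simp [List.foldl, h, recAux, ih]

theorem recAux_eq_zero (t : Int) (l : List Int) (h : ∀ y ∈ l, y ≤ t) : recAux t l = 0 := by
  induction l generalizing t with
  | nil => simp [recAux]
  | cons a l ih =>
    have ha : a ≤ t := h a (by simp)
    have : ¬ t < a := by omega
    simp [recAux, this]
    exact ih t (fun y hy => h y (by simp [hy]))

theorem recAux_split (pre suf : List Int) (m : Int) :
    ∀ (b : Int), b < m → (∀ y ∈ pre, y < m) → (∀ y ∈ suf, y ≤ m) →
    recAux b (pre ++ m :: suf) = recAux b pre + 1 := by
  induction pre with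
  | nil =>
    intro b hb _ hs
    simp [recAux, hb, recAux_eq_zero m suf hs]
  | cons p pre ih =>
    intro b hb hp hs
    have hpm : p < m := hp p (by simp)
    have hp' : ∀ y ∈ pre, y < m := fun y hy => hp y (by simp [hy])
    by_cases h : b < p
    · simp [recAux, h, ih p hpm hp' hs]
    · simp [recAux, h, ih b hb hp' hs]

theorem rcount_split (pre suf : List Int) (m : Int)
    (hp : ∀ y ∈ pre, y < m) (hs : ∀ y ∈ suf, y ≤ m) :
    rcount (pre ++ m :: suf) = rcount pre + 1 := by
  cases pre with
  | nil => simp [rcount, recAux_eq_zero m suf hs]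
  | cons p pre =>
    have hpm : p < m := hp p (by simp)
    have hp' : ∀ y ∈ pre, y < m := fun y hy => hp y (by simp [hy])
    simp [rcount, recAux_split pre suf m p hpm hp' hs]

-- B's simulation counts exactly the left-to-right strict maxima
theorem simMoves_eq_rcount (l : List Int) : simMoves l = rcount l := by
  induction hn : l.length using Nat.strong_induction_on generalizing l with
  | _ n ih =>
  cases l with
  | nil => simp [simMoves, rcount]
  | cons a t =>
    rw [simMoves]
    cases h1 : PySem.List.max? (a :: t) (fun y => y) with
    | none => exact absurd h1 (by simp [PySem.List.max?_eq_none_iff])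
    | some m =>
      cases h2 : PySem.List.index? (a :: t) m with
      | none =>
        have hm : m ∈ a :: t := PySem.List.max?_mem h1
        exact absurd h2 (by simp [hm])
      | some x =>
        have hmax : ∀ y ∈ a :: t, y ≤ m := by
          intro y hy
          simpa using PySem.List.max?_isMax h1 y hy
        obtain ⟨pre, suf, hsplit, hlen, hnot⟩ := ((PySem.List.index?_eq_some_iff _ _ _).1 h2)
        have hslice : PySem.List.slice (a :: t) none (some ((x : Nat) : Int)) = pre := by
          rw [PySem.List.slice_to_natCast, hsplit, ← hlen, List.take_left]
        have hp : ∀ y ∈ pre, y < m := by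
          intro y hy
          have hle : y ≤ m := hmax y (by rw [hsplit]; exact List.mem_append_left _ hy)
          rcases lt_or_eq_of_le hle with h | h
          · exact h
          · exact absurd (h ▸ hy) hnot
        have hs : ∀ y ∈ suf, y ≤ m := by
          intro y hy
          exact hmax y (by rw [hsplit]; exact List.mem_append_right _ (by simp [hy]))
        have hlt : pre.length < n := by
          have : (a :: t).length = pre.length + suf.length + 1 := by
            rw [hsplit]; simp; omega
          omega
        split
        · simp_all
        split
        · simp_all
        rename_i m' heq x' hx'
        obtain rfl : m = m' := Option.some.inj heq
        rw [h2] at hx'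
        obtain rfl : x' = x := (Option.some.inj hx').symm
        rw [hslice, ih pre.length hlt pre rfl, hsplit,
          rcount_split pre suf m hp hs]

-- total records = A's records-above-(-1) plus the negative records
theorem recAux_decompose (l : List Int) : ∀ (b : Int), b < 0 →
    recAux b l = recAux (-1) l + pvNegRecs b l := by
  induction l with
  | nil => intro b _; simp [recAux, pvNegRecs]
  | cons a t ih =>
    intro b hb
    by_cases h : b < a
    · by_cases ha : a < 0
      · have hna : ¬ ((-1 : Int) < a) := by omega
        simp [recAux, pvNegRecs, h, ha, hna, ih a ha]
        omega
      · have hna : (-1 : Int) < a := by omega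
        simp [recAux, pvNegRecs, h, ha, hna]
    · have hna : ¬ ((-1 : Int) < a) := by omega
      simp [recAux, pvNegRecs, h, hna, ih b hb]

theorem rcount_decompose (l : List Int) :
    rcount l = recAux (-1) l + pvNegCount l := by
  cases l with
  | nil => simp [rcount, recAux, pvNegCount]
  | cons a t =>
    by_cases ha : a < 0
    · have hna : ¬ ((-1 : Int) < a) := by omega
      simp [rcount, pvNegCount, recAux, ha, hna, recAux_decompose t a ha]
      ring
    · have hna : (-1 : Int) < a := by omega
      simp [rcount, pvNegCount, recAux, ha, hna]

-- the closed form of D_ counts records with a threshold: pvGB b t = recAux b t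
def pvGB (b : Int) (t : List Int) : Nat :=
  (t.inits.zip t).countP (fun p => decide (b < p.2 ∧ ∀ q ∈ p.1, q < p.2))

theorem zip_inits_cons (c : Int) (s : List Int) :
    ((c :: s).inits.zip (c :: s))
      = ([], c) :: (s.inits.zip s).map (Prod.map (c :: ·) id) := by
  rw [List.inits_cons, List.zip_cons_cons, List.zip_map_left]

theorem pvGB_eq (t : List Int) : ∀ b : Int, pvGB b t = recAux b t := by
  induction t with
  | nil => intro b; simp [pvGB, recAux]
  | cons c s ih =>
    intro b
    by_cases hbc : b < c
    · have hfun : ((fun p : List Int × Int => decide (b < p.2 ∧ ∀ q ∈ p.1, q < p.2)) ∘ Prod.map (c :: ·) id)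
          = (fun p : List Int × Int => decide (c < p.2 ∧ ∀ q ∈ p.1, q < p.2)) := by
        funext p
        rcases p with ⟨pr, v⟩
        simp only [Function.comp, Prod.map, id, decide_eq_decide, List.mem_cons, forall_eq_or_imp]
        constructor
        · rintro ⟨_, h2, h3⟩; exact ⟨h2, h3⟩
        · rintro ⟨h1, h2⟩; exact ⟨by omega, h1, h2⟩
      rw [pvGB, zip_inits_cons, recAux]
      simp only [List.countP_cons, List.countP_map, hfun]
      rw [show ((s.inits.zip s).countP (fun p : List Int × Int => decide (c < p.2 ∧ ∀ q ∈ p.1, q < p.2)))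
            = pvGB c s from rfl, ih c]
      simp [hbc]
    · have hfun : ((fun p : List Int × Int => decide (b < p.2 ∧ ∀ q ∈ p.1, q < p.2)) ∘ Prod.map (c :: ·) id)
          = (fun p : List Int × Int => decide (b < p.2 ∧ ∀ q ∈ p.1, q < p.2)) := by
        funext p
        rcases p with ⟨pr, v⟩
        simp only [Function.comp, Prod.map, id, decide_eq_decide, List.mem_cons, forall_eq_or_imp]
        constructor
        · rintro ⟨h1, _, h3⟩; exact ⟨h1, h3⟩
        · rintro ⟨h1, h2⟩; exact ⟨h1, by omega, h2⟩
      rw [pvGB, zip_inits_cons, recAux]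
      simp only [List.countP_cons, List.countP_map, hfun]
      rw [show ((s.inits.zip s).countP (fun p : List Int × Int => decide (b < p.2 ∧ ∀ q ∈ p.1, q < p.2)))
            = pvGB b s from rfl, ih b]
      simp [hbc]

-- records of the all-negative prefix = the recursive negative-record counter
theorem recAux_takeWhile (l : List Int) : ∀ b : Int, b < 0 →
    recAux b (l.takeWhile (fun v => decide (v < 0))) = pvNegRecs b l := by
  induction l with
  | nil => intro b _; simp [recAux, pvNegRecs]
  | cons a t ih =>
    intro b hb
    by_cases ha : a < 0
    · rw [List.takeWhile_cons_of_pos (by simpa using ha)]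
      by_cases h : b < a
      · simp [recAux, pvNegRecs, h, ha, ih a ha]
      · simp [recAux, pvNegRecs, h, ih b hb]
    · rw [List.takeWhile_cons_of_neg (by simpa using ha)]
      have h : b < a := by omega
      simp [recAux, pvNegRecs, h, ha]

theorem D_iff (arr : List Int) : D_gamingArray arr ↔ pvNegCount arr % 2 = 1 := by
  unfold D_gamingArray
  have key : ((arr.takeWhile (fun v => decide (v < 0))).inits.zip (arr.takeWhile (fun v => decide (v < 0)))).countP
      (fun p => decide (∀ q ∈ p.1, q < p.2)) = pvNegCount arr := by
    cases arr with
    | nil => simp [pvNegCount]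
    | cons a t =>
      by_cases ha : a < 0
      · rw [List.takeWhile_cons_of_pos (by simpa using ha)]
        have hfun : ((fun p : List Int × Int => decide (∀ q ∈ p.1, q < p.2)) ∘ Prod.map (a :: ·) id)
            = (fun p : List Int × Int => decide (a < p.2 ∧ ∀ q ∈ p.1, q < p.2)) := by
          funext p
          rcases p with ⟨pr, v⟩
          simp only [Function.comp, Prod.map, id, List.mem_cons, forall_eq_or_imp]
        rw [zip_inits_cons]
        simp only [List.countP_cons, List.countP_map, hfun]
        rw [show ((t.takeWhile (fun v => decide (v < 0))).inits.zip (t.takeWhile (fun v => decide (v < 0)))).countP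
              (fun p : List Int × Int => decide (a < p.2 ∧ ∀ q ∈ p.1, q < p.2))
            = pvGB a (t.takeWhile (fun v => decide (v < 0))) from rfl,
          pvGB_eq, recAux_takeWhile t a ha]
        simp [pvNegCount, ha]
      · rw [List.takeWhile_cons_of_neg (by simpa using ha)]
        simp [pvNegCount, ha]
  simp only [key]

-- both winners, expressed through the parities of recAux (-1) and pvNegCount
theorem gamingArray_eq (arr : List Int) :
    gamingArray arr = (if recAux (-1) arr % 2 = 1 then "BOB" else "ANDY") := by
  unfold gamingArray
  rw [foldA_eq arr (-1) 0]
  have h : ((0 + (recAux (-1) arr : Int)) % 2 == 1) = (recAux (-1) arr % 2 == 1) := by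
    rw [Bool.eq_iff_iff]
    simp only [beq_iff_eq]
    omega
  simp only [h]
  by_cases hc : recAux (-1) arr % 2 = 1 <;> simp [hc]

theorem gamingArray_alt_eq (arr : List Int) :
    gamingArray_alt arr = (if (recAux (-1) arr + pvNegCount arr) % 2 = 1 then "BOB" else "ANDY") := by
  unfold gamingArray_alt
  rw [simMoves_eq_rcount, rcount_decompose]
  by_cases hc : (recAux (-1) arr + pvNegCount arr) % 2 = 1 <;> simp [hc]

-- ===== VERDICT (by name: the statement is the Claim_ definition above) =====
theorem gamingArray_spec : Claim_unchanged_gamingArray := by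
  intro arr _ hD
  rw [D_iff] at hD
  rw [gamingArray_eq, gamingArray_alt_eq]
  have hD' : pvNegCount arr % 2 = 0 := by omega
  have : (recAux (-1) arr + pvNegCount arr) % 2 = recAux (-1) arr % 2 := by omega
  rw [this]

theorem gamingArray_changed : Claim_changed_gamingArray := by
  unfold Claim_changed_gamingArray
  refine ⟨by decide, by decide, by rfl, ?_, by decide⟩
  show gamingArray_alt [-5] = "BOB"
  unfold gamingArray_alt
  rw [simMoves_eq_rcount]
  rfl

theorem gamingArray_tight : Claim_exact_gamingArray := by
  intro arr _ hD
  rw [D_iff] at hD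
  rw [gamingArray_eq, gamingArray_alt_eq]
  have : (recAux (-1) arr + pvNegCount arr) % 2 ≠ recAux (-1) arr % 2 := by omega
  by_cases hc : recAux (-1) arr % 2 = 1
  · have : ¬ (recAux (-1) arr + pvNegCount arr) % 2 = 1 := by omega
    simp [hc, this]
  · have : (recAux (-1) arr + pvNegCount arr) % 2 = 1 := by omega
    simp [hc, this]
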